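-- pv_equiv track=rewrite | github.com/Gopi-1709/ExamhallSeatingArrangementSystem | seating_algorithm.py | fill_seats_zigzag
-- ===== SOURCE A (Python) =====
-- from collections import deque
--
-- def generate_zigzag_path(rows, cols):
--
--     path = []
--
--     for r in range(rows):
--
--         if r % 2 == 0:
--             for c in range(cols):
--                 path.append((r, c))
--         else:
--             for c in reversed(range(cols)):
--                 path.append((r, c))
--
--     return path
--
-- def department_rotation(dept_students):
--
--     queues = {
--         dept: deque(students)
--         for dept, students in dept_students.items()
--         if students
--     }
--
--     while queues:
--
--         for dept in list(queues.keys()):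
--
--             if queues[dept]:
--                 yield queues[dept].popleft(), dept
--             else:
--                 del queues[dept]
--
-- def fill_seats_zigzag(rows, cols, dept_students):
--
--     seating = [[None for _ in range(cols)] for _ in range(rows)]
--
--     zigzag_path = generate_zigzag_path(rows, cols)
--
--     rotator = department_rotation(dept_students)
--
--     for (r, c) in zigzag_path:
--
--         placed = False
--         attempts = 0
--
--         while not placed and attempts < 20:
--
--             try:
--                 student, dept = next(rotator)
--             except StopIteration:
--                 return seating
--
--             # LEFT CHECK
--             if c > 0 and seating[r][c-1] is not None:
--                 if seating[r][c-1][1] == dept: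
--                     attempts += 1
--                     continue
--
--             # TOP CHECK
--             if r > 0 and seating[r-1][c] is not None:
--                 if seating[r-1][c][1] == dept:
--                     attempts += 1
--                     continue
--
--             seating[r][c] = (student, dept)
--             placed = True
--
--     return seating
-- ===== SOURCE B (Python) =====
-- def fill_seats_zigzag(rows, cols, dept_students):
--     # Round-robin order as a column-wise read of the per-department lists.
--     lists = [(d, s) for d, s in dept_students.items() if s]
--     width = max((len(s) for _, s in lists), default=0)
--     order = [(s[k], d) for k in range(width) for d, s in lists if k < len(s)]
--
--     R, C = max(rows, 0), max(cols, 0)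
--     total = R * C
--     placed = {}          # (row, col) -> (student, dept)
--     t = 0                # zigzag rank of the seat currently being filled
--     attempts = 0
--     for student, dept in order:
--         if t == total:
--             break
--         r, q = divmod(t, C)
--         c = q if r % 2 == 0 else C - 1 - q
--         if (c > 0 and (r, c - 1) in placed and placed[r, c - 1][1] == dept) or \
--            (r > 0 and (r - 1, c) in placed and placed[r - 1, c][1] == dept):
--             attempts += 1
--             if attempts == 20:
--                 t += 1
--                 attempts = 0
--         else:
--             placed[r, c] = (student, dept)
--             t += 1
--             attempts = 0
--     return [[placed.get((r, c)) for c in range(C)] for r in range(R)]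
-- ===== Notes on version B (the rewrite author's own statement) =====
-- stated objective: alternative
-- what changed: B inverts the control flow: instead of A's seat-driven traversal (a path list plus a per-seat retry while-loop pulling from a deque-based round-robin generator), B makes the student sequence the primary loop, folding it once over a state (flat seat rank, attempt counter, dict of placements) with the zigzag coordinates computed arithmetically from the rank via divmod, and renders the grid from the dict at the end.
import Mathlib
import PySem

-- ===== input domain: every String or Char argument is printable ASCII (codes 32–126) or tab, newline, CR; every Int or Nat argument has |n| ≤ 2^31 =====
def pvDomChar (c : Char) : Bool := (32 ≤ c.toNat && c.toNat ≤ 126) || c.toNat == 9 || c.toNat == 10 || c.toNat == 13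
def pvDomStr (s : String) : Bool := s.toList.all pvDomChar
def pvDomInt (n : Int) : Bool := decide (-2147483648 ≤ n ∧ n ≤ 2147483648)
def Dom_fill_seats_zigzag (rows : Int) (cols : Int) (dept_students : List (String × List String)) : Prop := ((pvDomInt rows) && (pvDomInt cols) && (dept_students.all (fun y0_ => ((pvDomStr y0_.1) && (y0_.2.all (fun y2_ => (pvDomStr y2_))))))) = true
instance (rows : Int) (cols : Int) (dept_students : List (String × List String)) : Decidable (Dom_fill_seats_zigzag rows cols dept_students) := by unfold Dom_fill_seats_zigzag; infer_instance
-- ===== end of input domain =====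

-- B inverts the loop structure: the round-robin student sequence drives ONE fold over a state
-- (placement dict, flat zigzag seat rank, attempt counter), with seat coordinates computed
-- arithmetically from the rank, and the grid rendered from the dict at the end
-- (objective: alternative, not faster).

-- ===== PORT A =====
-- shared grid helpers: read / write seating[r][c]; every index the loops produce is in range,
-- where getD/set are exactly Python's list indexing/assignment
def pvCell (g : List (List (Option (String × String)))) (r c : Nat) : Option (String × String) :=
  (g.getD r []).getD c none

def pvSetCell (g : List (List (Option (String × String)))) (r c : Nat)
    (v : Option (String × String)) : List (List (Option (String × String))) :=
  g.modify r (fun row => row.set c v)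

-- generate_zigzag_path: append one (r, c) per column, columns reversed on odd rows
def genZigzagPathA (rows cols : Int) : List (Int × Int) :=
  (PySem.List.pyRange 0 rows 1).foldl (fun path r =>
    if PySem.Int.mod r 2 == 0 then
      (PySem.List.pyRange 0 cols 1).foldl (fun p c => p ++ [(r, c)]) path
    else
      ((PySem.List.pyRange 0 cols 1).reverse).foldl (fun p c => p ++ [(r, c)]) path) []

-- one sweep of department_rotation's inner `for dept in list(queues.keys())`:
-- yield the head of each queue that is non-empty, delete queues found empty
def sweepA : List (String × List String) → List (String × String) × List (String × List String)
  | [] => ([], [])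
  | (_, []) :: q => sweepA q
  | (d, s :: rest) :: q =>
    let p := sweepA q
    ((s, d) :: p.1, (d, rest) :: p.2)

def pvMu (q : List (String × List String)) : Nat :=
  q.length + (q.map (fun p => p.2.length)).sum

theorem sweepA_mu : ∀ q, pvMu (sweepA q).2 + q.length = pvMu q := by
  intro q
  induction q with
  | nil => rfl
  | cons p q ih =>
    rcases p with ⟨d, s⟩
    cases s with
    | nil => simp [sweepA, pvMu] at *; omega
    | cons x rest => simp [sweepA, pvMu] at *; omega

-- department_rotation's `while queues:` loop; the generator is pure, so its full yield
-- sequence is materialised (an exact model of lazy consumption)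
def rotA (q : List (String × List String)) : List (String × String) :=
  if _h : q = [] then []
  else (sweepA q).1 ++ rotA (sweepA q).2
termination_by pvMu q
decreasing_by
  have hm := sweepA_mu q
  have hl : 0 < q.length := List.length_pos_of_ne_nil _h
  omega

-- the `while not placed and attempts < 20` loop for one seat; none = StopIteration
def fillSeatA (r c : Nat) (g : List (List (Option (String × String))))
    (s : List (String × String)) (attempts : Nat) :
    Option (List (List (Option (String × String))) × List (String × String)) :=
  if 20 ≤ attempts then some (g, s)
  else
    match s with
    | [] => none
    | (stu, d) :: s' =>
      -- LEFT CHECK: `c > 0 and seating[r][c-1] is not None` and `[1] == dept` (flattened)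
      if decide (0 < c) && (pvCell g r (c - 1)).any (fun p => p.2 == d) then
        fillSeatA r c g s' (attempts + 1)
      -- TOP CHECK
      else if decide (0 < r) && (pvCell g (r - 1) c).any (fun p => p.2 == d) then
        fillSeatA r c g s' (attempts + 1)
      else some (pvSetCell g r c (some (stu, d)), s')

-- the `for (r, c) in zigzag_path` loop; .inl = the early `return seating`
def fillGoA : List (Int × Int) → List (List (Option (String × String))) →
    List (String × String) →
    (List (List (Option (String × String)))) ⊕
      (List (List (Option (String × String))) × List (String × String))
  | [], g, s => .inr (g, s)
  | rc :: rest, g, s =>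
    -- path coordinates come from range(...), hence ≥ 0: .toNat is exact
    match fillSeatA rc.1.toNat rc.2.toNat g s 0 with
    | none => .inl g
    | some gs => fillGoA rest gs.1 gs.2

def fill_seats_zigzag (rows : Int) (cols : Int) (dept_students : List (String × List String)) :
    List (List (Option (String × String))) :=
  let seating := (PySem.List.pyRange 0 rows 1).map
    (fun _ => (PySem.List.pyRange 0 cols 1).map (fun _ => (none : Option (String × String))))
  let zigzag_path := genZigzagPathA rows cols
  let rotator := rotA (dept_students.filter (fun p => !p.2.isEmpty))
  match fillGoA zigzag_path seating rotator with
  | .inl g => g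
  | .inr gs => gs.1

-- ===== PORT B =====
-- the whole round-robin order, read column-wise off the ragged per-department lists
def orderB (dept_students : List (String × List String)) : List (String × String) :=
  let ne := dept_students.filter (fun p => !p.2.isEmpty)
  -- max((len(s) for ...), default=0)
  let maxlen : Nat := PySem.List.maxD (ne.map (fun p => p.2.length)) (fun x => x) 0
  (PySem.List.pyRange 0 (maxlen : Int) 1).flatMap (fun k =>
    ne.filterMap (fun p =>
      -- s[k] is guarded by k < len(s): getD is exact here
      if k < (p.2.length : Int) then some (p.2.getD k.toNat "", p.1) else none))

-- the body of `for student, dept in order`; state = (placed, t, attempts); sd = (student, dept);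
-- divmod(t, C) is only reached with 0 ≤ t < total (so C > 0): floordiv/mod are exact there
def stepB (C : Int) (st : PySem.Dict (Int × Int) (String × String) × Int × Int)
    (sd : String × String) : PySem.Dict (Int × Int) (String × String) × Int × Int :=
  let placed := st.1
  let t := st.2.1
  let a := st.2.2
  let r := PySem.Int.floordiv t C
  let q := PySem.Int.mod t C
  let c := if PySem.Int.mod r 2 == 0 then q else C - 1 - q
  -- `(r, c-1) in placed and placed[r, c-1][1] == dept` = lookup-then-compare (flattened), ditto top
  if (decide (0 < c) && (placed.get? (r, c - 1)).any (fun p => p.2 == sd.2))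
      || (decide (0 < r) && (placed.get? (r - 1, c)).any (fun p => p.2 == sd.2)) then
    if a + 1 == 20 then (placed, t + 1, 0) else (placed, t, a + 1)
  else (placed.insert (r, c) sd, t + 1, 0)

-- the `for student, dept in order` loop with its `if t == total: break`
def goB (total C : Int) : List (String × String) →
    (PySem.Dict (Int × Int) (String × String) × Int × Int) →
    PySem.Dict (Int × Int) (String × String) × Int × Int
  | [], st => st
  | sd :: rest, st => if st.2.1 == total then st else goB total C rest (stepB C st sd)

def fill_seats_zigzag_alt (rows : Int) (cols : Int)
    (dept_students : List (String × List String)) :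
    List (List (Option (String × String))) :=
  let R := max rows 0
  let C := max cols 0
  let total := R * C
  let st := goB total C (orderB dept_students) (PySem.Dict.empty, 0, 0)
  -- [[placed.get((r, c)) for c in range(C)] for r in range(R)]
  (PySem.List.pyRange 0 R 1).map (fun r =>
    (PySem.List.pyRange 0 C 1).map (fun c => st.1.get? (r, c)))

-- ===== PRECONDITION & SPEC =====
def Spec_fill_seats_zigzag (rows : Int) (cols : Int) (dept_students : List (String × List String)) (out : List (List (Option (String × String)))) : Prop := out = fill_seats_zigzag_alt rows cols dept_students
instance (rows : Int) (cols : Int) (dept_students : List (String × List String)) (out : List (List (Option (String × String)))) : Decidable (Spec_fill_seats_zigzag rows cols dept_students out) := by unfold Spec_fill_seats_zigzag; infer_instance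

-- ===== CLAIM (what is proved, stated in full; the proofs are below) =====
def Claim_equal_fill_seats_zigzag : Prop := ∀ (rows : Int) (cols : Int) (dept_students : List (String × List String)), Dom_fill_seats_zigzag rows cols dept_students → Spec_fill_seats_zigzag rows cols dept_students (fill_seats_zigzag rows cols dept_students)

-- ===== LEMMAS AND PROOFS =====

-- ---- the two rotation orders agree ----
-- column k of the ragged department lists
def colK (k : Nat) (q : List (String × List String)) : List (String × String) :=
  q.filterMap (fun p => if k < p.2.length then some (p.2.getD k "", p.1) else none)

def pvM (q : List (String × List String)) : Nat :=
  (q.map (fun p => p.2.length)).foldr max 0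

-- column-wise reading of all lists: the common normal form of both orders
def pvS (q : List (String × List String)) : List (String × String) :=
  (List.range (pvM q)).flatMap (fun k => colK k q)

theorem sweepA_fst : ∀ q, (sweepA q).1 = colK 0 q := by
  intro q
  induction q with
  | nil => rfl
  | cons p q ih =>
    rcases p with ⟨d, s⟩
    cases s with
    | nil => simpa [sweepA, colK] using ih
    | cons x rest => simp [sweepA, colK] at *; exact ih

theorem colK_sweepA : ∀ q k, colK k (sweepA q).2 = colK (k + 1) q := by
  intro q
  induction q with
  | nil => intro k; rfl
  | cons p q ih =>
    intro k
    rcases p with ⟨d, s⟩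
    cases s with
    | nil => simpa [sweepA, colK] using ih k
    | cons x rest =>
      simp only [sweepA, colK, List.filterMap_cons, List.length_cons, List.getD_cons_succ,
        Nat.add_lt_add_iff_right]
      have := ih k
      simp only [colK] at this
      rw [this]

theorem pvM_sweepA : ∀ q, pvM (sweepA q).2 = pvM q - 1 := by
  intro q
  induction q with
  | nil => rfl
  | cons p q ih =>
    rcases p with ⟨d, s⟩
    cases s with
    | nil => simp [sweepA, pvM] at *; omega
    | cons x rest => simp [sweepA, pvM] at *; omega

theorem len_le_pvM : ∀ q (p : String × List String), p ∈ q → p.2.length ≤ pvM q := by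
  intro q
  induction q with
  | nil => intro p h; cases h
  | cons a q ih =>
    intro p h
    rcases List.mem_cons.mp h with h | h
    · subst h; simp [pvM]
    · have := ih p h; simp [pvM] at *; omega

theorem pvS_step : ∀ q, pvS q = colK 0 q ++ pvS (sweepA q).2 := by
  intro q
  cases h : pvM q with
  | zero =>
    have h0 : colK 0 q = [] := by
      apply List.filterMap_eq_nil_iff.mpr
      intro p hp
      have := len_le_pvM q p hp
      rw [h] at this
      simp [Nat.le_zero.mp this]
    have h2 : pvM (sweepA q).2 = 0 := by rw [pvM_sweepA, h]
    simp [pvS, h, h0, h2]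
  | succ m =>
    have h2 : pvM (sweepA q).2 = m := by rw [pvM_sweepA, h]; omega
    simp only [pvS, h, h2, List.range_succ_eq_map, List.flatMap_cons, List.flatMap_map]
    congr 1
    have hfun : (fun a : Nat => colK a.succ q) = fun k => colK k (sweepA q).2 := by
      funext k
      exact (colK_sweepA q k).symm
    rw [hfun]

theorem rotA_eq_pvS : ∀ q, rotA q = pvS q := by
  have aux : ∀ n q, pvMu q ≤ n → rotA q = pvS q := by
    intro n
    induction n with
    | zero =>
      intro q hq
      have : q = [] := by
        cases q with
        | nil => rfl
        | cons a t => simp [pvMu] at hq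
      subst this
      rw [rotA]; simp [pvS, pvM]
    | succ n ih =>
      intro q hq
      by_cases h : q = []
      · subst h; rw [rotA]; simp [pvS, pvM]
      · rw [rotA]; simp only [h, dite_false]
        have hl : 0 < q.length := List.length_pos_of_ne_nil h
        have hm := sweepA_mu q
        rw [ih (sweepA q).2 (by omega), sweepA_fst, ← pvS_step]
  intro q; exact aux (pvMu q) q le_rfl

theorem foldl_max_eq_foldr (l : List Nat) (a : Nat) :
    l.foldl max a = max a (l.foldr max 0) := by
  induction l generalizing a with
  | nil => simp
  | cons h t ih => simp [ih, Nat.max_assoc]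

theorem maxD_eq_pvM (q : List (String × List String)) :
    PySem.List.maxD (q.map (fun p => p.2.length)) (fun x => x) 0 = pvM q := by
  unfold PySem.List.maxD pvM
  cases hq : q.map (fun p => p.2.length) with
  | nil => simp [PySem.List.max?]
  | cons x t =>
    rw [PySem.List.max?_id_cons]
    simp [foldl_max_eq_foldr t x]

theorem orderB_eq_pvS (ds : List (String × List String)) :
    orderB ds = pvS (ds.filter (fun p => !p.2.isEmpty)) := by
  unfold orderB pvS
  dsimp only
  rw [maxD_eq_pvM, PySem.List.pyRange_one]
  simp only [sub_zero, Int.toNat_natCast, List.flatMap_map]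
  congr 1
  funext k
  unfold colK
  apply List.filterMap_congr
  intro p _
  by_cases h : k < p.2.length
  · simp [h]
  · simp [h]

-- ---- the zigzag path is the coordinate function of the flat seat rank ----
-- seat rank t ↦ grid coordinates, Cn = number of columns (as Nats)
def coordN (Cn t : Nat) : Nat × Nat :=
  (t / Cn, if (t / Cn) % 2 = 0 then t % Cn else Cn - 1 - t % Cn)

def coordI (Cn t : Nat) : Int × Int := (((coordN Cn t).1 : Int), ((coordN Cn t).2 : Int))

-- one row of the zigzag path
def rowPath (cols r : Int) : List (Int × Int) :=
  (if PySem.Int.mod r 2 == 0 then PySem.List.pyRange 0 cols 1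
   else (PySem.List.pyRange 0 cols 1).reverse).map (fun c => (r, c))

theorem genZigzagPathA_eq (rows cols : Int) :
    genZigzagPathA rows cols = (PySem.List.pyRange 0 rows 1).flatMap (rowPath cols) := by
  unfold genZigzagPathA
  have body : ∀ (path : List (Int × Int)) (r : Int),
      (if PySem.Int.mod r 2 == 0 then
        (PySem.List.pyRange 0 cols 1).foldl (fun p c => p ++ [(r, c)]) path
      else
        ((PySem.List.pyRange 0 cols 1).reverse).foldl (fun p c => p ++ [(r, c)]) path)
      = path ++ rowPath cols r := by
    intro path r
    have single : ∀ (l : List Int), List.flatMap (fun c => ([(r, c)] : List (Int × Int))) l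
        = l.map (fun c => (r, c)) := by
      intro l; induction l with
      | nil => rfl
      | cons x l ih => simp [ih]
    unfold rowPath
    by_cases h : PySem.Int.mod r 2 == 0
    · simp only [h, if_true]
      rw [show (fun (p : List (Int × Int)) (c : Int) => p ++ [(r, c)])
            = fun p c => p ++ (fun c => [(r, c)]) c from rfl,
          PySem.List.foldl_append_eq_flatMap, single]
    · simp only [h, Bool.false_eq_true, if_false]
      rw [show (fun (p : List (Int × Int)) (c : Int) => p ++ [(r, c)])
            = fun p c => p ++ (fun c => [(r, c)]) c from rfl,
          PySem.List.foldl_append_eq_flatMap, single]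
  have gen : ∀ (l : List Int) (init : List (Int × Int)),
      l.foldl (fun path r =>
        if PySem.Int.mod r 2 == 0 then
          (PySem.List.pyRange 0 cols 1).foldl (fun p c => p ++ [(r, c)]) path
        else
          ((PySem.List.pyRange 0 cols 1).reverse).foldl (fun p c => p ++ [(r, c)]) path) init
      = init ++ l.flatMap (rowPath cols) := by
    intro l
    induction l with
    | nil => intro init; simp
    | cons r l ih => intro init; rw [List.foldl_cons, body, List.flatMap_cons, ih]; simp
  simpa using gen (PySem.List.pyRange 0 rows 1) []

theorem rowPath_eq_coord (Cn : Nat) (r : Nat) :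
    rowPath ((Cn : Int)) ((r : Int)) = (List.range Cn).map (fun q => coordI Cn (r * Cn + q)) := by
  have hdm : ∀ q : Nat, q < Cn → coordN Cn (r * Cn + q)
      = (r, if r % 2 = 0 then q else Cn - 1 - q) := by
    intro q hq
    have h0 : 0 < Cn := by omega
    have hdiv : (r * Cn + q) / Cn = r := by
      rw [Nat.mul_comm, Nat.mul_add_div h0, Nat.div_eq_of_lt hq]
      omega
    have hmod : (r * Cn + q) % Cn = q := by
      rw [Nat.mul_comm, Nat.mul_add_mod, Nat.mod_eq_of_lt hq]
    unfold coordN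
    rw [hdiv, hmod]
  have hmr : PySem.Int.mod ((r : Nat) : Int) 2 = (((r % 2 : Nat) : Nat) : Int) :=
    PySem.Int.mod_natCast r 2
  unfold rowPath
  rw [PySem.List.pyRange_zero_natCast, hmr]
  by_cases hr : r % 2 = 0
  · have hb : ((((r % 2 : Nat) : Nat) : Int) == 0) = true := by simp [hr]
    rw [hb, if_pos rfl, List.map_map]
    apply List.map_congr_left
    intro q hq
    have hq' : q < Cn := List.mem_range.mp hq
    simp [Function.comp, coordI, hdm q hq', hr]
  · have hb : ((((r % 2 : Nat) : Nat) : Int) == 0) = false := by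
      simp only [beq_eq_false_iff_ne, ne_eq, Nat.cast_eq_zero]
      omega
    rw [hb, if_neg (by simp), ← List.map_reverse, List.range_eq_range', List.reverse_range',
      List.map_map, List.map_map, ← List.range_eq_range']
    apply List.map_congr_left
    intro q hq
    have hq' : q < Cn := List.mem_range.mp hq
    simp [Function.comp, coordI, hdm q hq', hr]

theorem path_eq_coords (Rn Cn : Nat) :
    genZigzagPathA ((Rn : Int)) ((Cn : Int)) = (List.range (Rn * Cn)).map (coordI Cn) := by
  rw [genZigzagPathA_eq, PySem.List.pyRange_zero_natCast]
  induction Rn with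
  | zero => simp
  | succ R ih =>
    rw [List.range_succ, List.map_append, List.flatMap_append, ih, Nat.succ_mul,
      List.range_add, List.map_append]
    congr 1
    simp only [List.map_cons, List.map_nil, List.flatMap_cons, List.flatMap_nil,
      List.append_nil, List.map_map]
    rw [rowPath_eq_coord]
    apply List.map_congr_left
    intro q _
    rfl

-- ---- grid as a function of the placement dict ----
def mkGrid (Rn Cn : Nat) (placed : PySem.Dict (Int × Int) (String × String)) :
    List (List (Option (String × String))) :=
  (List.range Rn).map (fun (r : Nat) =>
    (List.range Cn).map (fun (c : Nat) => placed.get? ((r : Int), (c : Int))))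

theorem pvCell_mkGrid (Rn Cn : Nat) (placed : PySem.Dict (Int × Int) (String × String))
    (r c : Nat) (hr : r < Rn) (hc : c < Cn) :
    pvCell (mkGrid Rn Cn placed) r c = placed.get? ((r : Int), (c : Int)) := by
  unfold pvCell mkGrid
  have h1 : ((List.range Rn).map
        (fun (r : Nat) => (List.range Cn).map (fun (c : Nat) => placed.get? ((r : Int), (c : Int))))).getD r []
      = (List.range Cn).map (fun (c : Nat) => placed.get? ((r : Int), (c : Int))) := by
    rw [List.getD_eq_getElem?_getD, List.getElem?_map, List.getElem?_range hr]
    rfl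
  rw [h1, List.getD_eq_getElem?_getD, List.getElem?_map, List.getElem?_range hc]
  rfl

theorem pvSetCell_mkGrid (Rn Cn : Nat) (placed : PySem.Dict (Int × Int) (String × String))
    (r c : Nat) (_hr : r < Rn) (_hc : c < Cn) (v : String × String) :
    pvSetCell (mkGrid Rn Cn placed) r c (some v)
      = mkGrid Rn Cn (placed.insert ((r : Int), (c : Int)) v) := by
  unfold pvSetCell mkGrid
  apply List.ext_getElem
  · simp [List.length_modify]
  intro i h1 h2
  rw [List.getElem_modify]
  simp only [List.getElem_map, List.getElem_range]
  have hi2 : i < Rn := by simpa using h2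
  by_cases hi : r = i
  · subst hi
    rw [if_pos rfl]
    apply List.ext_getElem
    · simp [List.length_set]
    intro j hj1 hj2
    rw [List.getElem_set]
    simp only [List.getElem_map, List.getElem_range]
    by_cases hj : c = j
    · subst hj
      rw [if_pos rfl, PySem.Dict.get?_insert, if_pos rfl]
    · rw [if_neg hj, PySem.Dict.get?_insert, if_neg (fun hcon => by
        have h2 := congrArg Prod.snd hcon
        simp only [Nat.cast_inj] at h2
        exact hj h2.symm)]
  · rw [if_neg hi]
    apply List.map_congr_left
    intro j _
    rw [PySem.Dict.get?_insert, if_neg (fun hcon => by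
      have h2 := congrArg Prod.fst hcon
      simp only [Nat.cast_inj] at h2
      exact hi h2.symm)]

-- ---- the main simulation ----
-- A's outer loop, remaining path, first seat entered with `attempts` already at a
def runA : List (Int × Int) → List (List (Option (String × String))) →
    List (String × String) → Nat → List (List (Option (String × String)))
  | [], g, _, _ => g
  | rc :: rest, g, s, a =>
    match fillSeatA rc.1.toNat rc.2.toNat g s a with
    | none => g
    | some gs => runA rest gs.1 gs.2 0

theorem fillGoA_eq_runA : ∀ (p : List (Int × Int)) g s,
    (match fillGoA p g s with
      | .inl g' => g'
      | .inr gs => gs.1) = runA p g s 0 := by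
  intro p
  induction p with
  | nil => intro g s; rfl
  | cons rc rest ih =>
    intro g s
    rw [fillGoA, runA]
    cases fillSeatA rc.1.toNat rc.2.toNat g s 0 with
    | none => rfl
    | some gs => exact ih gs.1 gs.2

-- remaining path from seat rank t
def pathFrom (Cn N t : Nat) : List (Int × Int) :=
  (List.range' t (N - t)).map (coordI Cn)

theorem main_sim (Rn Cn : Nat) : ∀ (s : List (String × String))
    (placed : PySem.Dict (Int × Int) (String × String)) (t a : Nat),
    t ≤ Rn * Cn → a < 20 →
    runA (pathFrom Cn (Rn * Cn) t) (mkGrid Rn Cn placed) s a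
      = mkGrid Rn Cn (goB ((Rn * Cn : Nat) : Int) ((Cn : Nat) : Int) s
          (placed, (t : Int), (a : Int))).1 := by
  intro s
  induction s with
  | nil =>
    intro placed t a ht ha
    rw [goB]
    by_cases h : t = Rn * Cn
    · subst h
      unfold pathFrom
      simp [runA]
    · unfold pathFrom
      rw [show Rn * Cn - t = (Rn * Cn - (t + 1)) + 1 from by omega, List.range'_succ,
        List.map_cons, runA, fillSeatA, if_neg (by omega : ¬ 20 ≤ a)]
  | cons sd s' ih =>
    obtain ⟨stu, d⟩ := sd
    intro placed t a ht ha
    by_cases h : t = Rn * Cn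
    · subst h
      rw [goB]
      dsimp only
      rw [if_pos (by simp)]
      unfold pathFrom
      simp [runA]
    · have htlt : t < Rn * Cn := by omega
      have hC : 0 < Cn := by
        rcases Nat.eq_zero_or_pos Cn with h0 | h0
        · rw [h0, Nat.mul_zero] at htlt; omega
        · exact h0
      have hmlt : t % Cn < Cn := Nat.mod_lt _ hC
      have hrlt : t / Cn < Rn := (Nat.div_lt_iff_lt_mul hC).mpr htlt
      set rn := t / Cn with hrn
      set cn := (coordN Cn t).2 with hcn
      have hclt : cn < Cn := by
        rw [hcn]; unfold coordN
        dsimp only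
        split_ifs <;> omega
      have hpath : pathFrom Cn (Rn * Cn) t = coordI Cn t :: pathFrom Cn (Rn * Cn) (t + 1) := by
        unfold pathFrom
        rw [show Rn * Cn - t = (Rn * Cn - (t + 1)) + 1 from by omega, List.range'_succ,
          List.map_cons]
      have hco1 : (coordI Cn t).1.toNat = rn := by
        rw [hrn]
        show (((coordN Cn t).1 : Nat) : Int).toNat = t / Cn
        rw [Int.toNat_natCast]
        rfl
      have hco2 : (coordI Cn t).2.toNat = cn := by
        rw [hcn]
        show (((coordN Cn t).2 : Nat) : Int).toNat = (coordN Cn t).2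
        rw [Int.toNat_natCast]
      -- A consumes the student (stu, d) at seat (rn, cn)
      have hA : fillSeatA rn cn (mkGrid Rn Cn placed) ((stu, d) :: s') a
          = if ((decide (0 < cn) && ((placed.get? ((rn : Int), ((cn - 1 : Nat) : Int))).any
                  (fun p => p.2 == d)))
                || (decide (0 < rn) && ((placed.get? (((rn - 1 : Nat) : Int), (cn : Int))).any
                  (fun p => p.2 == d)))) then
              fillSeatA rn cn (mkGrid Rn Cn placed) s' (a + 1)
            else some (pvSetCell (mkGrid Rn Cn placed) rn cn (some (stu, d)), s') := by
        rw [fillSeatA, if_neg (by omega : ¬ 20 ≤ a)]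
        rw [pvCell_mkGrid Rn Cn placed rn (cn - 1) hrlt (by omega),
          pvCell_mkGrid Rn Cn placed (rn - 1) cn (by omega) hclt]
        rcases Bool.eq_false_or_eq_true
            (decide (0 < cn) && ((placed.get? ((rn : Int), ((cn - 1 : Nat) : Int))).any
              (fun p => p.2 == d))) with h1 | h1 <;>
          rcases Bool.eq_false_or_eq_true
              (decide (0 < rn) && ((placed.get? (((rn - 1 : Nat) : Int), (cn : Int))).any
                (fun p => p.2 == d))) with h2 | h2 <;>
          simp [h1, h2]
      -- B performs the same step
      have hB : stepB ((Cn : Nat) : Int) (placed, (t : Int), (a : Int)) (stu, d)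
          = if ((decide ((0 : Int) < (cn : Int)) && ((placed.get? ((rn : Int), (cn : Int) - 1)).any
                  (fun p => p.2 == d)))
                || (decide ((0 : Int) < (rn : Int)) && ((placed.get? ((rn : Int) - 1, (cn : Int))).any
                  (fun p => p.2 == d)))) then
              (if (((a : Int) + 1) == 20) = true then (placed, (t : Int) + 1, (0 : Int))
               else (placed, (t : Int), (a : Int) + 1))
            else (placed.insert ((rn : Int), (cn : Int)) (stu, d), (t : Int) + 1, (0 : Int)) := by
        simp only [stepB]
        rw [show PySem.Int.floordiv ((t : Nat) : Int) ((Cn : Nat) : Int) = ((rn : Nat) : Int) from by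
            rw [hrn]; exact_mod_cast PySem.Int.floordiv_natCast t Cn]
        rw [show PySem.Int.mod ((t : Nat) : Int) ((Cn : Nat) : Int) = ((t % Cn : Nat) : Int) from by
            exact_mod_cast PySem.Int.mod_natCast t Cn]
        rw [show PySem.Int.mod ((rn : Nat) : Int) 2 = ((rn % 2 : Nat) : Int) from by
            exact_mod_cast PySem.Int.mod_natCast rn 2]
        by_cases hp : rn % 2 = 0
        · rw [if_pos (show (((rn % 2 : Nat) : Int) == 0) = true from by
              simp only [beq_iff_eq, Nat.cast_eq_zero]; exact hp),
            show ((t % Cn : Nat) : Int) = ((cn : Nat) : Int) from by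
              rw [hcn]; unfold coordN; rw [← hrn, if_pos hp]]
        · rw [if_neg (show ¬ ((((rn % 2 : Nat) : Int)) == 0) = true from by
              simp only [beq_iff_eq, Nat.cast_eq_zero]; exact hp),
            show ((Cn : Nat) : Int) - 1 - ((t % Cn : Nat) : Int) = ((cn : Nat) : Int) from by
              rw [hcn]; unfold coordN; rw [← hrn, if_neg hp]; omega]
      -- the two conflict tests agree
      have eL : (decide (0 < cn) && ((placed.get? ((rn : Int), ((cn - 1 : Nat) : Int))).any
              (fun p => p.2 == d)))
          = (decide ((0 : Int) < (cn : Int)) && ((placed.get? ((rn : Int), (cn : Int) - 1)).any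
              (fun p => p.2 == d))) := by
        by_cases h1 : 0 < cn
        · rw [show ((cn - 1 : Nat) : Int) = (cn : Int) - 1 from by omega]
          simp [h1]
        · simp [h1]
      have eT : (decide (0 < rn) && ((placed.get? (((rn - 1 : Nat) : Int), (cn : Int))).any
              (fun p => p.2 == d)))
          = (decide ((0 : Int) < (rn : Int)) && ((placed.get? ((rn : Int) - 1, (cn : Int))).any
              (fun p => p.2 == d))) := by
        by_cases h2 : 0 < rn
        · rw [show ((rn - 1 : Nat) : Int) = (rn : Int) - 1 from by omega]
          simp [h2]
        · simp [h2]
      -- unroll one element on each side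
      rw [hpath, runA, hco1, hco2, hA, eL, eT]
      rw [goB]
      dsimp only
      rw [if_neg (show ¬ ((((t : Nat) : Int) == ((Rn * Cn : Nat) : Int)) = true) from by
        simp only [beq_iff_eq]
        intro hh
        exact h (by exact_mod_cast hh)), hB]
      by_cases hcd : ((decide ((0 : Int) < (cn : Int)) && ((placed.get? ((rn : Int), (cn : Int) - 1)).any
            (fun p => p.2 == d)))
          || (decide ((0 : Int) < (rn : Int)) && ((placed.get? ((rn : Int) - 1, (cn : Int))).any
            (fun p => p.2 == d)))) = true
      · rw [if_pos hcd, if_pos hcd]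
        by_cases h20 : a + 1 = 20
        · rw [if_pos (by simp only [beq_iff_eq]; omega)]
          rw [fillSeatA.eq_def, if_pos (by omega : 20 ≤ a + 1)]
          have := ih placed (t + 1) 0 (by omega) (by omega)
          simpa using this
        · rw [if_neg (by simp only [beq_iff_eq]; omega)]
          have IH' := ih placed t (a + 1) (by omega) (by omega)
          rw [hpath, runA, hco1, hco2] at IH'
          simpa using IH'
      · rw [if_neg hcd, if_neg hcd]
        rw [pvSetCell_mkGrid Rn Cn placed rn cn hrlt hclt]
        have := ih (placed.insert ((rn : Int), (cn : Int)) (stu, d)) (t + 1) 0 (by omega) (by omega)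
        simpa using this

-- the initial all-None grid is the empty-dict grid
theorem init_grid_eq (rows cols : Int) :
    (PySem.List.pyRange 0 rows 1).map
      (fun _ => (PySem.List.pyRange 0 cols 1).map (fun _ => (none : Option (String × String))))
      = mkGrid rows.toNat cols.toNat PySem.Dict.empty := by
  unfold mkGrid
  rw [PySem.List.pyRange_one, PySem.List.pyRange_one]
  simp only [sub_zero, zero_add, List.map_map]
  apply List.map_congr_left
  intro r _
  apply List.map_congr_left
  intro c _
  simp [PySem.Dict.get?_empty]

-- pyRange 0 b only depends on the clamped bound
theorem pyRange_toNat (b : Int) :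
    PySem.List.pyRange 0 b 1 = PySem.List.pyRange 0 ((b.toNat : Nat) : Int) 1 := by
  rw [PySem.List.pyRange_one, PySem.List.pyRange_one,
    show (((b.toNat : Nat) : Int) - 0).toNat = (b - 0).toNat from by omega]

-- rendering the dict as a grid
theorem render_eq (Rn Cn : Nat) (D : PySem.Dict (Int × Int) (String × String)) :
    (PySem.List.pyRange 0 ((Rn : Nat) : Int) 1).map (fun r =>
      (PySem.List.pyRange 0 ((Cn : Nat) : Int) 1).map (fun c => D.get? (r, c)))
      = mkGrid Rn Cn D := by
  rw [PySem.List.pyRange_zero_natCast, PySem.List.pyRange_zero_natCast]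
  unfold mkGrid
  rw [List.map_map]
  apply List.map_congr_left
  intro r _
  simp only [Function.comp_apply, List.map_map]
  rfl

-- ===== VERDICT (by name: the statement is the Claim_ definition above) =====
theorem fill_seats_zigzag_spec : Claim_equal_fill_seats_zigzag := by
  intro rows cols ds _
  unfold Spec_fill_seats_zigzag fill_seats_zigzag
  rw [init_grid_eq]
  have hpc : genZigzagPathA rows cols
      = genZigzagPathA ((rows.toNat : Nat) : Int) ((cols.toNat : Nat) : Int) := by
    unfold genZigzagPathA
    rw [pyRange_toNat rows, pyRange_toNat cols]
  rw [hpc, path_eq_coords, rotA_eq_pvS, ← orderB_eq_pvS, fillGoA_eq_runA]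
  rw [show (List.range (rows.toNat * cols.toNat)).map (coordI cols.toNat)
      = pathFrom cols.toNat (rows.toNat * cols.toNat) 0 from by
    unfold pathFrom
    rw [Nat.sub_zero, List.range_eq_range']]
  rw [main_sim rows.toNat cols.toNat (orderB ds) PySem.Dict.empty 0 0 (by omega) (by omega)]
  have halt : fill_seats_zigzag_alt rows cols ds
      = (PySem.List.pyRange 0 (max rows 0) 1).map (fun r =>
          (PySem.List.pyRange 0 (max cols 0) 1).map (fun c =>
            (goB (max rows 0 * max cols 0) (max cols 0) (orderB ds)
              (PySem.Dict.empty, 0, 0)).1.get? (r, c))) := rfl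
  rw [halt, show max rows 0 = ((rows.toNat : Nat) : Int) from by omega,
    show max cols 0 = ((cols.toNat : Nat) : Int) from by omega, render_eq]
  norm_cast
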